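-- pv_equiv track=rewrite | github.com/Floodnut/Algorithm | programmers/Hash/42579_hash.py | sortD
-- ===== SOURCE A (Python) =====
-- from collections import defaultdict
--
-- def sortD(genres, plays):
--     playsTotal = defaultdict(int)
--     ii = defaultdict(list)
--     pt1 = 0
--
--     for i in range(len(genres)):
--         playsTotal[genres[i]] += plays[i]   # 장르 별 총 재생 수
--         ii[genres[i]].append((i, plays[i])) # 장르 별 노래의 고유번호와 재생 수를 저장 [(고유번호, 재생 수),(고유번호, 재생 수), ...]
--
--         pt1 = sorted(playsTotal.items(), key=lambda x: x[1], reverse=True)  # 장르 별 총 재생 수를 기준으로 내림차순으로 정렬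
--
--     return pt1, ii
-- ===== SOURCE B (Python) =====
-- def sortD(genres, plays):
--     # first-seen genre order
--     order = []
--     for g in genres:
--         if g not in order:
--             order.append(g)
--     # per genre, collect (index, plays) by scanning the enumerated song list
--     ii = {g: [(i, p) for i, (g2, p) in enumerate(zip(genres, plays)) if g2 == g]
--           for g in order}
--     pt1 = sorted([(g, sum(p for _, p in lst)) for g, lst in ii.items()],
--                  key=lambda x: x[1], reverse=True)
--     return pt1, ii
-- ===== Notes on version B (the rewrite author's own statement) =====
-- stated objective: alternative
-- what changed: B first computes the first-seen genre order, then builds each genre's group by one filtered scan over the enumerated (genre, plays) pairs and sorts the derived totals ONCE, instead of A's single indexed loop that mutates two dicts and re-sorts the whole totals dict on every iteration.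
-- outside the precondition, e.g. on sortD([], []): A returns (0, {}), B returns ([], {})
import Mathlib
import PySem

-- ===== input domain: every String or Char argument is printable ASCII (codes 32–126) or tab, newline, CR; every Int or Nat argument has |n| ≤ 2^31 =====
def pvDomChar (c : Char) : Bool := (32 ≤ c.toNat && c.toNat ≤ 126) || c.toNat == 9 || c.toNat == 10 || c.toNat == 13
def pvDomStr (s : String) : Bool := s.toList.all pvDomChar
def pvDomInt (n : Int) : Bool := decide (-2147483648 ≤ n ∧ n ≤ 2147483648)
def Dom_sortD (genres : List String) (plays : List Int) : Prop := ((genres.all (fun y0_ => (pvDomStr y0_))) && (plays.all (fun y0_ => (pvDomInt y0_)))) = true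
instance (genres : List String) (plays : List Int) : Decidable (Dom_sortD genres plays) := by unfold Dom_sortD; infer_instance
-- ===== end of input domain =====

-- B computes the first-seen genre order, then builds each group by a filtered scan over the
-- enumerated (genre, plays) pairs and sorts the derived totals once, instead of A's single
-- indexed loop that mutates two dicts and re-sorts the whole totals dict on every iteration.

-- ===== PORT A =====
-- loop body of A's single for-loop (state = (playsTotal, ii, pt1))
def sortD_step (genres : List String) (plays : List Int)
    (s : PySem.Dict String Int × PySem.Dict String (List (Int × Int)) × List (String × Int))
    (i : Int) : PySem.Dict String Int × PySem.Dict String (List (Int × Int)) × List (String × Int) :=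
  let g := PySem.List.pyGetD genres i ""
  let pt := s.1.modify g 0 (· + PySem.List.pyGetD plays i 0)       -- playsTotal[g] += plays[i]
  let d := s.2.1.modify g [] (· ++ [(i, PySem.List.pyGetD plays i 0)])  -- ii[g].append((i, plays[i]))
  (pt, d, PySem.List.sorted pt.items (fun x => x.2) true)          -- pt1 = sorted(playsTotal.items(), key=…, reverse=True)

-- Python's initial pt1 = 0 (an int, not a list) is unrepresentable in the return type; Pre_ excludes
-- genres = [], the only case where that sentinel is returned, so the initial [] here is never returned.
def sortD (genres : List String) (plays : List Int) : (List (String × Int)) × (List (String × List (Int × Int))) :=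
  (((PySem.List.pyRange 0 (PySem.List.len genres) 1).foldl (sortD_step genres plays)
      (PySem.Dict.empty, PySem.Dict.empty, [])).2.2,
   ((PySem.List.pyRange 0 (PySem.List.len genres) 1).foldl (sortD_step genres plays)
      (PySem.Dict.empty, PySem.Dict.empty, [])).2.1.items)

-- ===== PORT B =====
-- first loop of B: order = [] ; for g in genres: if g not in order: order.append(g)
def sortD_alt_order (genres : List String) : List String :=
  genres.foldl (fun order g => if order.contains g then order else order ++ [g]) []

-- B's comprehension: [(i, p) for i, (g2, p) in enumerate(zip(genres, plays)) if g2 == g]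
def sortD_alt_group (genres : List String) (plays : List Int) (g : String) : List (Int × Int) :=
  (PySem.List.enumerate (genres.zip plays)).filterMap
    (fun e => if e.2.1 == g then some (e.1, e.2.2) else none)

def sortD_alt (genres : List String) (plays : List Int) : (List (String × Int)) × (List (String × List (Int × Int))) :=
  let ii := (sortD_alt_order genres).map (fun g => (g, sortD_alt_group genres plays g))
  (PySem.List.sorted (ii.map (fun gl => (gl.1, (gl.2.map Prod.snd).sum))) (fun x => x.2) true,
   ii)

-- ===== PRECONDITION & SPEC =====
-- Pre_ excludes (a) genres = [], where A returns the int sentinel 0 instead of a list (not a value of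
-- the declared return type), and (b) plays shorter than genres, where A raises IndexError on plays[i].
def Pre_sortD (genres : List String) (plays : List Int) : Prop :=
  genres ≠ [] ∧ genres.length ≤ plays.length
instance (genres : List String) (plays : List Int) : Decidable (Pre_sortD genres plays) := by
  unfold Pre_sortD; infer_instance
def pvWitness_sortD : List String × List Int := (["a", "b", "a"], [5, 3, 2])

def Spec_sortD (genres : List String) (plays : List Int) (out : (List (String × Int)) × (List (String × List (Int × Int)))) : Prop := out = sortD_alt genres plays
instance (genres : List String) (plays : List Int) (out : (List (String × Int)) × (List (String × List (Int × Int)))) : Decidable (Spec_sortD genres plays out) := by unfold Spec_sortD; infer_instance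

-- ===== CLAIM (what is proved, stated in full; the proofs are below) =====
def Claim_equal_sortD : Prop := ∀ (genres : List String) (plays : List Int), Dom_sortD genres plays → Pre_sortD genres plays → Spec_sortD genres plays (sortD genres plays)

-- ===== LEMMAS AND PROOFS =====

-- the totals entry derived from a group entry
def pvF (gl : String × List (Int × Int)) : String × Int := (gl.1, (gl.2.map Prod.snd).sum)

-- the grouping fold A performs on its ii dict, seen over enumerated (genre, plays) pairs
def pvGStep (d : PySem.Dict String (List (Int × Int))) (e : Int × (String × Int)) :
    PySem.Dict String (List (Int × Int)) :=
  d.modify e.2.1 [] (· ++ [(e.1, e.2.2)])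

theorem pv_map_fst (F : String → List (Int × Int)) (O : List String) :
    (O.map (fun g => (g, F g))).map (fun q => q.1) = O := by
  induction O with
  | nil => rfl
  | cons o t ih => simp [ih]

-- B's order accumulator, with a general starting accumulator (for induction)
def pvOrd (acc : List String) (m : List String) : List String :=
  m.foldl (fun order g => if order.contains g then order else order ++ [g]) acc

theorem pv_mem_ord (m : List String) : ∀ (acc : List String) (x : String),
    x ∈ pvOrd acc m ↔ x ∈ acc ∨ x ∈ m := by
  induction m with
  | nil => intro acc x; simp [pvOrd]
  | cons g t ih =>
    intro acc x
    show x ∈ pvOrd (if acc.contains g then acc else acc ++ [g]) t ↔ _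
    by_cases h : acc.contains g = true
    · rw [if_pos h, ih]
      have : g ∈ acc := by simpa using h
      constructor
      · rintro (hx | hx) <;> simp_all
      · rintro (hx | hx)
        · exact Or.inl hx
        · rcases List.mem_cons.mp hx with rfl | hx
          · exact Or.inl this
          · exact Or.inr hx
    · rw [if_neg h, ih]
      simp [or_assoc, List.mem_append]

theorem pv_ord_append (acc m : List String) (g : String) :
    pvOrd acc (m ++ [g]) = if (pvOrd acc m).contains g then pvOrd acc m else pvOrd acc m ++ [g] := by
  simp [pvOrd, List.foldl_append]

theorem pv_flt_nil (l : List (Int × (String × Int))) (g : String)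
    (h : g ∉ l.map (fun e => e.2.1)) :
    l.filterMap (fun e => if e.2.1 == g then some (e.1, e.2.2) else none) = [] := by
  rw [List.filterMap_eq_nil_iff]
  intro e he
  have hne : e.2.1 ≠ g := fun hh => h (List.mem_map.mpr ⟨e, he, hh⟩)
  simp [hne]

theorem pv_get?_mk_map (F : String → List (Int × Int)) (O : List String) (g : String)
    (h : g ∈ O) :
    (PySem.Dict.mk (O.map (fun x => (x, F x)))).get? g = some (F g) := by
  induction O with
  | nil => simp at h
  | cons o t ih =>
    simp only [List.map_cons, PySem.Dict.get?_mk_cons]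
    by_cases ho : o = g
    · subst ho; simp
    · have : (o == g) = false := by simpa using ho
      rcases List.mem_cons.mp h with rfl | ht
      · simp at ho
      · simp [this, ih ht]

-- main grouping lemma: A's ii fold produces exactly B's order-then-filter structure
theorem pv_group (l : List (Int × (String × Int))) :
    (l.foldl pvGStep PySem.Dict.empty).items
      = (pvOrd [] (l.map (fun e => e.2.1))).map
          (fun g => (g, l.filterMap (fun e => if e.2.1 == g then some (e.1, e.2.2) else none))) := by
  induction l using List.reverseRecOn with
  | nil => rfl
  | append_singleton l e ih =>
    obtain ⟨i, g, p⟩ := e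
    set D := l.foldl pvGStep PySem.Dict.empty with hD
    have hfold : ((l ++ [(i, g, p)]).foldl pvGStep PySem.Dict.empty) = pvGStep D (i, g, p) := by
      rw [List.foldl_append]; rfl
    set O := pvOrd [] (l.map (fun e => e.2.1)) with hO
    set flt := fun (m : List (Int × (String × Int))) (x : String) =>
        m.filterMap (fun e => if e.2.1 == x then some (e.1, e.2.2) else none) with hflt
    have hDmk : D = PySem.Dict.mk (O.map (fun x => (x, flt l x))) := PySem.Dict.ext ih
    have hkeys : D.keys = O := by
      show D.items.map (·.1) = O
      rw [ih]; exact pv_map_fst (flt l) O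
    have hcont : D.contains g = decide (g ∈ O) := by
      rw [PySem.Dict.contains_eq_decide_mem_keys, hkeys]
    have hmapg : (l ++ [(i, g, p)]).map (fun e => e.2.1) = l.map (fun e => e.2.1) ++ [g] := by simp
    have hcontO : O.contains g = decide (g ∈ O) := by
      by_cases h : g ∈ O <;> simp [h]
    -- the new filtered groups, per genre
    have hfltapp : ∀ x, flt (l ++ [(i, g, p)]) x
        = flt l x ++ (if g == x then [(i, p)] else []) := by
      intro x
      simp only [hflt, List.filterMap_append]
      congr 1
      by_cases h : g = x
      · subst h; simp [List.filterMap_cons]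
      · have hb : (g == x) = false := by simpa using h
        simp [List.filterMap_cons, hb, h]
    rw [hfold, hmapg, pv_ord_append, hcontO]
    show (D.modify g [] (· ++ [(i, p)])).items = _
    have hmod : D.modify g [] (· ++ [(i, p)]) = D.insert g (D.getD g [] ++ [(i, p)]) := rfl
    by_cases hg : g ∈ O
    · -- genre already present: the single matching entry gets (i, p) appended
      have hget : D.get? g = some (flt l g) := by rw [hDmk]; exact pv_get?_mk_map _ _ _ hg
      have hgetD : D.getD g [] = flt l g := by
        rw [PySem.Dict.getD_eq_get?_getD, hget]; rfl
      have hc : D.contains g = true := by rw [hcont]; simpa using hg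
      rw [if_pos (by simpa using hg), hmod, PySem.Dict.items_insert_of_contains _ _ hc, ih,
        List.map_map]
      apply List.map_congr_left
      intro x hx
      by_cases hxg : x = g
      · subst hxg
        simp [hgetD, hfltapp, hflt]
      · have h1 : (x == g) = false := by simpa using hxg
        have hgx : ¬g = x := fun hh => hxg hh.symm
        have h2 : (g == x) = false := by simpa using hgx
        simp [h1, hxg, hfltapp, h2, hgx, hflt, List.filterMap_cons]
    · -- new genre: a fresh entry is appended at the end
      have hc : D.contains g = false := by rw [hcont]; simpa using hg
      have hgetD : D.getD g [] = [] := PySem.Dict.getD_of_not_contains _ _ hc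
      have hgnotin : g ∉ l.map (fun e => e.2.1) := by
        intro hmem
        exact hg ((pv_mem_ord _ _ _).mpr (Or.inr hmem))
      rw [if_neg (by simpa using hg), hmod, PySem.Dict.items_insert_of_not_contains _ _ hc, ih,
        List.map_append]
      congr 1
      · apply List.map_congr_left
        intro x hx
        have hgx : ¬g = x := fun h => hg (h ▸ hx)
        have h2 : (g == x) = false := by simpa using hgx
        simp [hfltapp, h2, hgx, hflt, List.filterMap_cons]
      · simp [hgetD, hfltapp, hflt, List.filterMap_cons, pv_flt_nil l g hgnotin]
        intro a x b hm hxg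
        exact hgnotin (List.mem_map.mpr ⟨(a, x, b), hm, by simp [hxg]⟩)

-- A's indexed loop over its ii dict equals the fold of pvGStep over the enumerated zip
theorem pv_afold (genres : List String) (plays : List Int)
    (hlen : genres.length ≤ plays.length) (d0 : PySem.Dict String (List (Int × Int))) :
    (PySem.List.pyRange 0 (PySem.List.len genres) 1).foldl
        (fun d j => d.modify (PySem.List.pyGetD genres j "") []
          (· ++ [(j, PySem.List.pyGetD plays j 0)])) d0
      = (PySem.List.enumerate (genres.zip plays)).foldl pvGStep d0 := by
  rw [PySem.List.enumerate_eq_map_pyRange (d := ("", (0 : Int))), List.foldl_map]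
  have hzlen : PySem.List.len (genres.zip plays) = PySem.List.len genres := by
    simp [PySem.List.len_eq, Nat.min_eq_left hlen]
  rw [hzlen]
  apply PySem.List.foldl_congr_mem
  intro acc j hj
  obtain ⟨h0, h1⟩ := PySem.List.mem_pyRange_one.mp hj
  have h1' : j < (genres.length : Int) := by simpa [PySem.List.len_eq] using h1
  have h1p : j < (plays.length : Int) := by
    have : (genres.length : Int) ≤ (plays.length : Int) := by exact_mod_cast hlen
    omega
  have hg : PySem.List.pyGetD genres j "" = genres[j.toNat] :=
    PySem.List.pyGetD_eq_getElem genres "" h0 h1'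
  have hp : PySem.List.pyGetD plays j 0 = plays[j.toNat] :=
    PySem.List.pyGetD_eq_getElem plays 0 h0 h1p
  have hz : PySem.List.pyGetD (genres.zip plays) j ("", (0 : Int))
      = (genres[j.toNat], plays[j.toNat]) := by
    rw [PySem.List.pyGetD_eq_getElem _ _ h0
      (by rw [List.length_zip, Nat.min_eq_left hlen]; exact h1')]
    simp
  simp [pvGStep, hz, hg, hp]

-- the second state component of A's loop is the plain grouping fold on A's ii dict
theorem pv_proj (genres : List String) (plays : List Int) :
    ∀ (l : List Int) (s : PySem.Dict String Int × PySem.Dict String (List (Int × Int)) × List (String × Int)),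
      (l.foldl (sortD_step genres plays) s).2.1
        = l.foldl (fun d j => d.modify (PySem.List.pyGetD genres j "") []
            (· ++ [(j, PySem.List.pyGetD plays j 0)])) s.2.1 := by
  intro l
  induction l with
  | nil => intro s; rfl
  | cons i t ih => intro s; exact ih _

theorem pv_get?_map_F (l : List (String × List (Int × Int))) (g : String) :
    (PySem.Dict.mk (l.map pvF)).get? g
      = ((PySem.Dict.mk l).get? g).map (fun v => (v.map Prod.snd).sum) := by
  induction l with
  | nil => rfl
  | cons q t ih =>
    obtain ⟨k, v⟩ := q
    simp only [List.map_cons, pvF, PySem.Dict.get?_mk_cons]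
    by_cases h : k == g
    · simp [h]
    · simp [h, ih]

theorem pv_step_inv (d : PySem.Dict String (List (Int × Int))) (g : String) (i p : Int) :
    (PySem.Dict.mk (d.items.map pvF)).modify g 0 (· + p)
      = PySem.Dict.mk (((d.modify g [] (· ++ [(i, p)])).items).map pvF) := by
  have hmodL : (PySem.Dict.mk (d.items.map pvF)).modify g 0 (· + p)
      = (PySem.Dict.mk (d.items.map pvF)).insert g ((PySem.Dict.mk (d.items.map pvF)).getD g 0 + p) := rfl
  have hmodR : d.modify g [] (· ++ [(i, p)]) = d.insert g (d.getD g [] ++ [(i, p)]) := rfl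
  have hkeys : (PySem.Dict.mk (d.items.map pvF)).keys = d.keys := by
    simp only [PySem.Dict.keys, List.map_map]
    rfl
  have hcont : (PySem.Dict.mk (d.items.map pvF)).contains g = d.contains g := by
    rw [PySem.Dict.contains_eq_decide_mem_keys, PySem.Dict.contains_eq_decide_mem_keys, hkeys]
  rw [hmodL, hmodR]
  apply PySem.Dict.ext
  by_cases hc : d.contains g = true
  · rw [PySem.Dict.items_insert_of_contains _ _ (by rw [hcont]; exact hc),
        PySem.Dict.items_insert_of_contains _ _ hc]
    show (d.items.map pvF).map _ = (d.items.map _).map pvF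
    rw [List.map_map, List.map_map]
    apply List.map_congr_left
    intro q _
    simp only [Function.comp_apply, pvF]
    by_cases hq : q.1 == g
    · simp only [hq, if_pos]
      have hg : (PySem.Dict.mk (d.items.map pvF)).getD g 0 = ((d.get? g).map (fun v => (v.map Prod.snd).sum)).getD 0 := by
        rw [PySem.Dict.getD_eq_get?_getD, pv_get?_map_F]
      have hd : d.getD g [] = (d.get? g).getD [] := PySem.Dict.getD_eq_get?_getD d g []
      cases hget : d.get? g with
      | none =>
        exfalso
        rw [PySem.Dict.contains_eq_isSome_get?, hget] at hc
        simp at hc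
      | some v =>
        simp [hg, hd, hget]
    · simp [hq]
  · have hc' : d.contains g = false := by simpa using hc
    rw [PySem.Dict.items_insert_of_not_contains _ _ (by rw [hcont]; exact hc'),
        PySem.Dict.items_insert_of_not_contains _ _ hc']
    have hg0 : (PySem.Dict.mk (d.items.map pvF)).getD g 0 = 0 :=
      PySem.Dict.getD_of_not_contains _ _ (by rw [hcont]; exact hc')
    have hgl : d.getD g [] = [] := PySem.Dict.getD_of_not_contains _ _ hc'
    simp [hg0, hgl, pvF]

-- invariant: the totals dict is pvF mapped over the grouping dict
theorem pv_inv (genres : List String) (plays : List Int) :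
    ∀ (l : List Int) (s : PySem.Dict String Int × PySem.Dict String (List (Int × Int)) × List (String × Int)),
      s.1 = PySem.Dict.mk (s.2.1.items.map pvF) →
      (l.foldl (sortD_step genres plays) s).1
        = PySem.Dict.mk (((l.foldl (sortD_step genres plays) s).2.1).items.map pvF) := by
  intro l
  induction l with
  | nil => intro s h; exact h
  | cons i t ih =>
    intro s h
    apply ih
    show (sortD_step genres plays s i).1
        = PySem.Dict.mk (((sortD_step genres plays s i).2.1).items.map pvF)
    simp only [sortD_step]
    rw [h]
    exact pv_step_inv s.2.1 _ i _

-- after a nonempty loop, pt1 is the sort of the current totals dict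
theorem pv_pt1 (genres : List String) (plays : List Int) :
    ∀ (l : List Int) (s : PySem.Dict String Int × PySem.Dict String (List (Int × Int)) × List (String × Int)),
      l ≠ [] →
      (l.foldl (sortD_step genres plays) s).2.2
        = PySem.List.sorted ((l.foldl (sortD_step genres plays) s).1.items) (fun x => x.2) true := by
  intro l
  induction l with
  | nil => intro s h; exact absurd rfl h
  | cons i t ih =>
    intro s _
    cases t with
    | nil => rfl
    | cons j u => exact ih _ (by simp)

-- ===== VERDICT (by name: the statement is the Claim_ definition above) =====
theorem sortD_spec : Claim_equal_sortD := by
  intro genres plays _ hpre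
  obtain ⟨hne, hlen⟩ := hpre
  show sortD genres plays = sortD_alt genres plays
  have hl : (PySem.List.enumerate (genres.zip plays)).map (fun e => e.2.1) = genres := by
    have h1 : (PySem.List.enumerate (genres.zip plays)).map (fun e => e.2.1)
        = ((PySem.List.enumerate (genres.zip plays)).map (·.2)).map (·.1) := by
      rw [List.map_map]; rfl
    rw [h1, PySem.List.map_snd_enumerate, List.map_fst_zip hlen]
  -- A's ii items equal B's ii list
  have hgroups :
      ((PySem.List.pyRange 0 (PySem.List.len genres) 1).foldl (sortD_step genres plays)
        (PySem.Dict.empty, PySem.Dict.empty, [])).2.1.items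
      = (sortD_alt_order genres).map (fun g => (g, sortD_alt_group genres plays g)) := by
    rw [pv_proj, pv_afold genres plays hlen, pv_group, hl]
    rfl
  have hlenpos : (0 : Int) < PySem.List.len genres := by
    simp only [PySem.List.len_eq]
    exact_mod_cast List.length_pos_iff.mpr hne
  have hr : PySem.List.pyRange 0 (PySem.List.len genres) 1 ≠ [] := by
    rw [PySem.List.pyRange_one_cons hlenpos]; simp
  have hinv := pv_inv genres plays (PySem.List.pyRange 0 (PySem.List.len genres) 1)
      (PySem.Dict.empty, PySem.Dict.empty, []) rfl
  have hpt1 := pv_pt1 genres plays (PySem.List.pyRange 0 (PySem.List.len genres) 1)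
      (PySem.Dict.empty, PySem.Dict.empty, []) hr
  unfold sortD sortD_alt
  refine Prod.ext ?_ ?_
  · show ((PySem.List.pyRange 0 (PySem.List.len genres) 1).foldl (sortD_step genres plays)
        (PySem.Dict.empty, PySem.Dict.empty, [])).2.2 = _
    rw [hpt1, hinv]
    show PySem.List.sorted
        ((((PySem.List.pyRange 0 (PySem.List.len genres) 1).foldl (sortD_step genres plays)
          (PySem.Dict.empty, PySem.Dict.empty, [])).2.1.items).map pvF) _ _ = _
    rw [hgroups]
    rfl
  · exact hgroups
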